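-- pv_equiv track=rewrite | github.com/ppaleja/graph_coloring | Code/utils.py | greedyClique
-- ===== SOURCE A (Python) =====
-- def greedyClique(G, startV):
--     clique = [startV]
--     for v in G:
--         if v in clique:
--             continue
--         isNext = True
--         for u in clique:
--             if u in G[v]:
--                 continue
--             else:
--                 isNext = False
--                 break
--         if isNext:
--             clique.append(v)
--
--     return sorted(clique)
-- ===== SOURCE B (Python) =====
-- def greedyClique(G, startV):
--     # B: maintain the set of vertices still adjacent to every clique member,
--     # instead of re-scanning the clique for each candidate.
--     clique = [startV]
--     eligible = {w for w in G if startV in G[w]}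
--     for v in G:
--         if v not in eligible:
--             continue
--         if v in clique:
--             continue
--         clique.append(v)
--         eligible = {w for w in eligible if v in G[w]}
--     return sorted(clique)
-- ===== Notes on version B (the rewrite author's own statement) =====
-- stated objective: alternative
-- what changed: Replaces A's inner re-scan of the whole clique per candidate by an incrementally filtered 'eligible' set of vertices adjacent to all current clique members; a candidate is admitted by one set-membership test.
import Mathlib
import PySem

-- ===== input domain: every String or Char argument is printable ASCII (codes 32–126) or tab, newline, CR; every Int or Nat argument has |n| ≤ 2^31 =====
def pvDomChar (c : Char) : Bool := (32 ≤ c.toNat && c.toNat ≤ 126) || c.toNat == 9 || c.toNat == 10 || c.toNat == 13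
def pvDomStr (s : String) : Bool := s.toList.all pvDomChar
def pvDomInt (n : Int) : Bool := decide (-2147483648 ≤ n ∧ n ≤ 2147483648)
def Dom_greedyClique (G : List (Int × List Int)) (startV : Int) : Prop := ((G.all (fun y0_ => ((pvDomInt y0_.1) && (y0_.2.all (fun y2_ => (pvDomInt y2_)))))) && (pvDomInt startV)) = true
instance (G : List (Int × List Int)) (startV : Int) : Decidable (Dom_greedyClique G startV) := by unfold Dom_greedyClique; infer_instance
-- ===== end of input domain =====

-- B replaces A's per-candidate re-scan of the clique by an incrementally filtered
-- set of still-eligible vertices (alternative decomposition; equal return value proved).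


-- G[v]: first-match lookup in the association list (Python dict lookup)
def pvAdj (G : List (Int × List Int)) (v : Int) : List Int :=
  ((G.find? (fun p => p.1 == v)).map Prod.snd).getD []

-- ===== PORT A =====
-- one iteration of A's outer loop; the inner 'for u in clique: … break' computes 'all u in clique: u in G[v]'
def pvStepA (G : List (Int × List Int)) (clique : List Int) (v : Int) : List Int :=
  if clique.contains v then clique
  else if clique.all (fun u => (pvAdj G v).contains u) then clique ++ [v]
  else clique

def greedyClique (G : List (Int × List Int)) (startV : Int) : List Int :=
  PySem.List.sorted ((G.map Prod.fst).foldl (pvStepA G) [startV]) (fun x => x) false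

-- ===== PORT B =====
-- one iteration of B's loop over state (clique, eligible)
def pvStepB (G : List (Int × List Int)) (s : List Int × PySem.Set Int) (v : Int) :
    List Int × PySem.Set Int :=
  if !(PySem.Set.contains s.2 v) then s
  else if s.1.contains v then s
  else (s.1 ++ [v], s.2.filter (fun w => (pvAdj G w).contains v))

def greedyClique_alt (G : List (Int × List Int)) (startV : Int) : List Int :=
  let keys := G.map Prod.fst
  let s := keys.foldl (pvStepB G)
      ([startV], PySem.Set.ofList (keys.filter (fun w => (pvAdj G w).contains startV)))
  PySem.List.sorted s.1 (fun x => x) false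

-- ===== PRECONDITION & SPEC =====
def Spec_greedyClique (G : List (Int × List Int)) (startV : Int) (out : List Int) : Prop := out = greedyClique_alt G startV
instance (G : List (Int × List Int)) (startV : Int) (out : List Int) : Decidable (Spec_greedyClique G startV out) := by unfold Spec_greedyClique; infer_instance

-- ===== CLAIM (what is proved, stated in full; the proofs are below) =====
def Claim_equal_greedyClique : Prop := ∀ (G : List (Int × List Int)) (startV : Int), Dom_greedyClique G startV → Spec_greedyClique G startV (greedyClique G startV)

-- ===== LEMMAS AND PROOFS =====

-- the loop invariant: 'eligible' holds exactly the keys adjacent to every current clique member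
theorem pv_loop_eq (G : List (Int × List Int)) (allKeys : List Int) (ks : List Int)
    (clique : List Int) (eligible : List Int)
    (hks : ∀ v ∈ ks, v ∈ allKeys)
    (hinv : ∀ w, w ∈ eligible ↔ (w ∈ allKeys ∧ ∀ u ∈ clique, (pvAdj G w).contains u = true)) :
    (ks.foldl (pvStepB G) (clique, eligible)).1 = ks.foldl (pvStepA G) clique := by
  induction ks generalizing clique eligible with
  | nil => rfl
  | cons v ks ih =>
    have hvK : v ∈ allKeys := hks v (by simp)
    simp only [List.foldl_cons]
    by_cases hc : v ∈ clique
    · have hA : pvStepA G clique v = clique := by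
        simp [pvStepA, hc]
      have hB : pvStepB G (clique, eligible) v = (clique, eligible) := by
        simp [pvStepB, hc]
      rw [hA, hB]
      exact ih clique eligible (fun x hx => hks x (by simp [hx])) hinv
    · have helig : (PySem.Set.contains eligible v = true) ↔
          (∀ u ∈ clique, (pvAdj G v).contains u = true) := by
        rw [PySem.Set.contains_iff, hinv v]
        exact ⟨fun h => h.2, fun h => ⟨hvK, h⟩⟩
      by_cases hall : ∀ u ∈ clique, (pvAdj G v).contains u = true
      · have hA : pvStepA G clique v = clique ++ [v] := by
          simp only [pvStepA]
          rw [if_neg (by simpa using hc), if_pos (by simpa using hall)]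
        have hB : pvStepB G (clique, eligible) v =
            (clique ++ [v], eligible.filter (fun w => (pvAdj G w).contains v)) := by
          simp only [pvStepB]
          rw [helig.2 hall]
          simp [hc]
        rw [hA, hB]
        refine ih _ _ (fun x hx => hks x (by simp [hx])) ?_
        intro w
        simp only [List.mem_filter, hinv w]
        constructor
        · rintro ⟨⟨hwa, hwall⟩, hwv⟩
          refine ⟨hwa, ?_⟩
          intro u hu
          rcases List.mem_append.mp hu with h | h
          · exact hwall u h
          · simp only [List.mem_singleton] at h; subst h; exact hwv
        · rintro ⟨hwa, hwall⟩
          exact ⟨⟨hwa, fun u hu => hwall u (by simp [hu])⟩, hwall v (by simp)⟩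
      · have hA : pvStepA G clique v = clique := by
          simp only [pvStepA]
          rw [if_neg (by simpa using hc), if_neg (by simpa using hall)]
        have hB : pvStepB G (clique, eligible) v = (clique, eligible) := by
          simp only [pvStepB]
          have : PySem.Set.contains eligible v = false := by
            cases h : PySem.Set.contains eligible v
            · rfl
            · exact absurd (helig.1 h) hall
          rw [this]
          simp
        rw [hA, hB]
        exact ih clique eligible (fun x hx => hks x (by simp [hx])) hinv

-- ===== VERDICT (by name: the statement is the Claim_ definition above) =====
theorem greedyClique_spec : Claim_equal_greedyClique := by
  intro G startV _
  unfold Spec_greedyClique greedyClique greedyClique_alt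
  congr 1
  rw [← pv_loop_eq G (G.map Prod.fst) (G.map Prod.fst) [startV]
      (PySem.Set.ofList ((G.map Prod.fst).filter (fun w => (pvAdj G w).contains startV)))
      (fun _ h => h)]
  intro w
  rw [PySem.Set.mem_ofList, List.mem_filter]
  constructor
  · rintro ⟨h1, h2⟩
    exact ⟨h1, fun u hu => by simp only [List.mem_singleton] at hu; subst hu; exact h2⟩
  · rintro ⟨h1, h2⟩
    exact ⟨h1, h2 startV (by simp)⟩
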